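-- pv_equiv track=rewrite | github.com/ollinurb/python-problems | labs109.py | colour_trio
-- ===== SOURCE A (Python) =====
-- def colour_trio(colours):
--     processed_list = colours
--     while(len(processed_list) > 1):
--         temp_list = []
--         for i in range(len(processed_list) - 1):
--             if(processed_list[i] == processed_list[i+1]):
--                 temp_list.append(processed_list[i])
--             elif((processed_list[i] != "b") & (processed_list[i+1] != "b")):
--                 temp_list.append("b")
--             elif((processed_list[i] != "y") & (processed_list[i+1] != "y")):
--                 temp_list.append("y")
--             else:
--                 temp_list.append("r")
--         processed_list = temp_list
--     return processed_list[0]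
-- ===== SOURCE B (Python) =====
-- # One online left-to-right pass: apex[i] always holds the fully reduced colour of
-- # colours[i:j] for the prefix of length j read so far (uses apex(s) =
-- # mix(apex(s[:-1]), apex(s[1:]))), instead of A's repeated whole-list passes.
--
-- def _mix(a, b):
--     if a == b:
--         return a
--     if 'b' not in (a, b):
--         return 'b'
--     if 'y' not in (a, b):
--         return 'y'
--     return 'r'
--
-- def colour_trio(colours):
--     apex = []  # apex[i] == reduced colour of colours[i:j] after j characters seen
--     for ch in colours:
--         apex.append(ch)
--         for i in range(len(apex) - 2, -1, -1):
--             apex[i] = _mix(apex[i], apex[i + 1])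
--     return apex[0]
-- ===== Notes on version B (the rewrite author's own statement) =====
-- stated objective: alternative
-- what changed: Replaces A's repeated whole-list reduction passes (shrink the list by one until a single colour remains) by one online left-to-right pass that maintains, for every suffix start i, the fully reduced colour of colours[i:j] via apex(s) = mix(apex(s[:-1]), apex(s[1:])).
import Mathlib
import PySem

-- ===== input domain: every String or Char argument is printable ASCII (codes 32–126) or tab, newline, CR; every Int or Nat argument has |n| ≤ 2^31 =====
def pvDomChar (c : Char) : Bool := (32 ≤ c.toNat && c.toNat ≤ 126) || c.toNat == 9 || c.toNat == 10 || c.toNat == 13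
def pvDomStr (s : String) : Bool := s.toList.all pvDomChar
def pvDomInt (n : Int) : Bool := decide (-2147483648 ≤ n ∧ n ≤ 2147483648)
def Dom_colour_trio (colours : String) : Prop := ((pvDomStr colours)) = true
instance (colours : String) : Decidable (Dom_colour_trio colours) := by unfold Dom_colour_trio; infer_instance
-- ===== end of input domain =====

-- B replaces A's repeated whole-list reduction passes by one online left-to-right pass
-- maintaining the reduced colour of every suffix of the prefix read so far (objective: alternative).


-- ===== PORT A =====
-- the if/elif chain of A's inner loop, branch for branch
def pvCombineA (a b : Char) : Char :=
  if a = b then a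
  else if a ≠ 'b' ∧ b ≠ 'b' then 'b'
  else if a ≠ 'y' ∧ b ≠ 'y' then 'y'
  else 'r'

-- one pass of A's for-loop over adjacent pairs (temp_list)
def pvStepA : List Char → List Char
  | a :: b :: rest => pvCombineA a b :: pvStepA (b :: rest)
  | _ => []

-- needed by pvLoopA's termination proof
theorem pvStepA_length (l : List Char) : (pvStepA l).length = l.length - 1 := by
  match l with
  | [] => rfl
  | [_] => rfl
  | a :: b :: rest => simp [pvStepA, pvStepA_length (b :: rest)]

-- A's while-loop
def pvLoopA (l : List Char) : List Char :=
  if _ : l.length > 1 then pvLoopA (pvStepA l) else l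
termination_by l.length
decreasing_by rw [pvStepA_length]; omega

def colour_trio (colours : String) : String :=
  -- processed_list[0]; on the empty string Python raises IndexError (outside Pre_)
  String.mk ((pvLoopA colours.toList).take 1)

-- ===== PORT B =====
-- Source B's _mix: "'b' not in (a, b)" is ¬('b' = a ∨ 'b' = b)
def pvMixB (a b : Char) : Char :=
  if a = b then a
  else if ¬('b' = a ∨ 'b' = b) then 'b'
  else if ¬('y' = a ∨ 'y' = b) then 'y'
  else 'r'

-- Source B's inner loop: append ch, then write apex[i] for i = len-2 .. 0, each cell
-- reading the already-updated apex[i+1]; this recursion computes the same cells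
-- (each is written once from its updated right neighbour), front-first.
def pvUpd (ch : Char) : List Char → List Char
  | [] => [ch]
  | a :: rest =>
      let r := pvUpd ch rest
      pvMixB a (r.headD ch) :: r

def colour_trio_alt (colours : String) : String :=
  -- apex[0]; on the empty string Python raises IndexError (outside Pre_)
  String.mk [(colours.toList.foldl (fun apex ch => pvUpd ch apex) []).headD 'r']

-- ===== PRECONDITION & SPEC =====
-- Pre_ excludes only the empty string, on which both A and B raise IndexError.
def Pre_colour_trio (colours : String) : Prop := PySem.Str.len colours ≠ 0
instance (colours : String) : Decidable (Pre_colour_trio colours) := by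
  unfold Pre_colour_trio; infer_instance
def pvWitness_colour_trio : String := "ry"
def Spec_colour_trio (colours : String) (out : String) : Prop := out = colour_trio_alt colours
instance (colours : String) (out : String) : Decidable (Spec_colour_trio colours out) := by unfold Spec_colour_trio; infer_instance

-- ===== CLAIM (what is proved, stated in full; the proofs are below) =====
def Claim_equal_colour_trio : Prop := ∀ (colours : String), Dom_colour_trio colours → Pre_colour_trio colours → Spec_colour_trio colours (colour_trio colours)

-- ===== LEMMAS AND PROOFS =====

theorem pvMixB_eq (a b : Char) : pvMixB a b = pvCombineA a b := by
  unfold pvMixB pvCombineA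
  by_cases h1 : a = b
  · simp [h1]
  · by_cases h2 : a = 'b' <;> by_cases h3 : b = 'b' <;>
      by_cases h4 : a = 'y' <;> by_cases h5 : b = 'y' <;>
      simp [h1, h2, h3, h4, h5, eq_comm]

-- the reduced colour ("apex") of a nonempty segment
def pvR : List Char → Char
  | [] => 'r'
  | [a] => a
  | a :: b :: rest => pvCombineA (pvR ((a :: b :: rest).dropLast)) (pvR (b :: rest))
termination_by l => l.length
decreasing_by all_goals (simp [List.length_dropLast]; try omega)

theorem pvR_eq (l : List Char) (h : 2 ≤ l.length) :
    pvR l = pvCombineA (pvR l.dropLast) (pvR l.tail) := by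
  match l with
  | [] => simp at h
  | [a] => simp at h
  | a :: b :: rest => rw [pvR]; rfl

theorem pvStepA_tail (l : List Char) (h : 2 ≤ l.length) :
    (pvStepA l).tail = pvStepA l.tail := by
  match l with
  | [] => simp at h
  | [a] => simp at h
  | a :: b :: rest => rfl

theorem pvStepA_dropLast : ∀ (l : List Char), 2 ≤ l.length →
    pvStepA l.dropLast = (pvStepA l).dropLast := by
  intro l
  match l with
  | [] => intro h; simp at h
  | [a] => intro h; simp at h
  | [a, b] => intro _; rfl
  | a :: b :: c :: rest =>
    intro _
    have ih := pvStepA_dropLast (b :: c :: rest) (by simp)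
    simp only [List.dropLast_cons₂, pvStepA] at ih ⊢
    rw [ih]

theorem pvR_step : ∀ (m : ℕ) (l : List Char), l.length = m → 2 ≤ l.length →
    pvR (pvStepA l) = pvR l := by
  intro m
  induction m using Nat.strong_induction_on with
  | _ m ih =>
    intro l hm h2
    match l, h2 with
    | [a, b], _ => simp [pvStepA, pvR]
    | a :: b :: c :: rest, _ =>
      have hlen : 2 ≤ (pvStepA (a :: b :: c :: rest)).length := by
        rw [pvStepA_length]; simp
      rw [pvR_eq _ hlen, pvR_eq (a :: b :: c :: rest) (by simp)]
      rw [← pvStepA_dropLast (a :: b :: c :: rest) (by simp),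
        pvStepA_tail (a :: b :: c :: rest) (by simp)]
      have hd := ih (a :: b :: c :: rest).dropLast.length
        (by simp [List.length_dropLast] at hm ⊢; omega)
        (a :: b :: c :: rest).dropLast rfl (by simp)
      have ht := ih (a :: b :: c :: rest).tail.length
        (by simp at hm ⊢; omega)
        (a :: b :: c :: rest).tail rfl (by simp)
      rw [hd, ht]

-- A's loop computes pvR
theorem pvLoopA_eq : ∀ (m : ℕ) (l : List Char), l.length = m → l ≠ [] →
    pvLoopA l = [pvR l] := by
  intro m
  induction m using Nat.strong_induction_on with
  | _ m ih =>
    intro l hm hne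
    rw [pvLoopA]
    by_cases h1 : l.length > 1
    · simp only [h1, dite_true]
      have hslen : (pvStepA l).length = l.length - 1 := pvStepA_length l
      have hsne : pvStepA l ≠ [] := by
        intro h; rw [h] at hslen; simp at hslen; omega
      rw [ih (pvStepA l).length (by omega) (pvStepA l) rfl hsne,
        pvR_step l.length l rfl (by omega)]
    · simp only [h1, dite_false]
      match l, hne with
      | [a], _ => simp [pvR]
      | a :: b :: rest, _ => simp at h1

-- B's state: the reduced colour of every suffix of the prefix read so far
def pvS : List Char → List Char
  | [] => []
  | a :: rest => pvR (a :: rest) :: pvS rest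

theorem pvS_headD (p : List Char) (hne : p ≠ []) (d : Char) :
    (pvS p).headD d = pvR p := by
  match p, hne with
  | a :: rest, _ => simp [pvS]

theorem pvR_snoc (p : List Char) (hne : p ≠ []) (ch : Char) :
    pvR (p ++ [ch]) = pvCombineA (pvR p) (pvR (p.tail ++ [ch])) := by
  have hp : 0 < p.length := List.length_pos_iff.mpr hne
  rw [pvR_eq (p ++ [ch]) (by simp; omega), List.dropLast_concat]
  match p, hne with
  | a :: rest, _ => rfl

theorem pvUpd_S : ∀ (p : List Char) (ch : Char), pvUpd ch (pvS p) = pvS (p ++ [ch]) := by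
  intro p
  induction p with
  | nil => intro ch; simp [pvS, pvUpd, pvR]
  | cons a rest ihp =>
    intro ch
    simp only [pvS, pvUpd, ihp ch]
    rw [pvS_headD (rest ++ [ch]) (by simp) ch, pvMixB_eq]
    have hsn := pvR_snoc (a :: rest) (by simp) ch
    simp only [List.tail_cons] at hsn
    rw [← hsn]
    simp [pvS]

theorem pvFoldl_S : ∀ (p q : List Char),
    p.foldl (fun apex ch => pvUpd ch apex) (pvS q) = pvS (q ++ p) := by
  intro p
  induction p with
  | nil => intro q; simp
  | cons ch rest ihp =>
    intro q
    simp only [List.foldl_cons, pvUpd_S q ch, ihp (q ++ [ch])]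
    simp

-- ===== VERDICT (by name: the statement is the Claim_ definition above) =====
theorem colour_trio_spec : Claim_equal_colour_trio := by
  intro colours _ hpre
  have hne : colours.toList ≠ [] := by
    intro h
    apply hpre
    simp [PySem.Str.len_eq, h]
  unfold Spec_colour_trio colour_trio colour_trio_alt
  rw [pvLoopA_eq colours.toList.length colours.toList rfl hne]
  have hfold : colours.toList.foldl (fun apex ch => pvUpd ch apex) [] = pvS colours.toList := by
    have := pvFoldl_S colours.toList []
    simpa using this
  rw [hfold, pvS_headD colours.toList hne 'r']
  rfl
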